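-- pv_equiv track=rewrite | github.com/ezcat207/MIRIX | mirix/agents/growth_analysis_agent.py | _is_related_activity
-- ===== SOURCE A (Python) =====
-- def _is_related_activity(app1: str, app2: str) -> bool:
--     """
--     判断两个应用是否属于相关活动
--
--     例如：
--     - VSCode + Terminal = 相关（coding）
--     - Chrome + Notion = 相关（research/writing）
--     - VSCode + Slack = 不太相关（可能是被打断）
--
--     Args:
--         app1: 第一个应用名称
--         app2: 第二个应用名称
--
--     Returns:
--         是否相关
--     """
--     # 定义应用分组
--     coding_apps = {"vscode", "code", "pycharm", "intellij", "vim", "terminal", "iterm"}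
--     browser_apps = {"chrome", "safari", "firefox", "edge"}
--     communication_apps = {"slack", "teams", "zoom", "discord", "wechat", "telegram"}
--     design_apps = {"figma", "sketch", "photoshop", "illustrator"}
--     office_apps = {"word", "excel", "powerpoint", "notion", "obsidian", "pages"}
--
--     app1_lower = app1.lower()
--     app2_lower = app2.lower()
--
--     # 检查是否在同一组
--     for app_group in [
--         coding_apps,
--         browser_apps,
--         communication_apps,
--         design_apps,
--         office_apps,
--     ]:
--         if any(app in app1_lower for app in app_group) and any(
--             app in app2_lower for app in app_group
--         ):
--             return True
--
--     # Coding + Browser 也认为相关（查文档）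
--     if (
--         any(app in app1_lower for app in coding_apps)
--         and any(app in app2_lower for app in browser_apps)
--     ) or (
--         any(app in app2_lower for app in coding_apps)
--         and any(app in app1_lower for app in browser_apps)
--     ):
--         return True
--
--     return False
-- ===== SOURCE B (Python) =====
-- # Bitmask re-implementation: one flat keyword->bit table folded into an int mask
-- # per app; the coding/browser cross rule disappears into a mask augmentation.
-- _CODING, _BROWSER, _COMM, _DESIGN, _OFFICE = 1, 2, 4, 8, 16
--
-- _FLAT_KEYWORDS = (
--     [(k, _CODING) for k in ("vscode", "code", "pycharm", "intellij", "vim", "terminal", "iterm")]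
--     + [(k, _BROWSER) for k in ("chrome", "safari", "firefox", "edge")]
--     + [(k, _COMM) for k in ("slack", "teams", "zoom", "discord", "wechat", "telegram")]
--     + [(k, _DESIGN) for k in ("figma", "sketch", "photoshop", "illustrator")]
--     + [(k, _OFFICE) for k in ("word", "excel", "powerpoint", "notion", "obsidian", "pages")]
-- )
--
--
-- def _mask(name: str) -> int:
--     n = name.lower()
--     m = 0
--     for kw, bit in _FLAT_KEYWORDS:
--         if kw in n:
--             m |= bit
--     return m
--
--
-- def _is_related_activity(app1: str, app2: str) -> bool:
--     m1 = _mask(app1)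
--     m2 = _mask(app2)
--     # coding apps also count as browser-compatible (docs lookup), both ways
--     if m1 & _CODING:
--         m1 |= _BROWSER
--     if m2 & _CODING:
--         m2 |= _BROWSER
--     return (m1 & m2) != 0
-- ===== Notes on version B (the rewrite author's own statement) =====
-- stated objective: alternative
-- what changed: Replaces A's five group-by-group double scans plus a separate coding/browser cross-check by folding one flat keyword-to-bit table into an integer bitmask per app, augmenting the coding bit with the browser bit, and testing mask intersection with a single bitwise AND.
import Mathlib
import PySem

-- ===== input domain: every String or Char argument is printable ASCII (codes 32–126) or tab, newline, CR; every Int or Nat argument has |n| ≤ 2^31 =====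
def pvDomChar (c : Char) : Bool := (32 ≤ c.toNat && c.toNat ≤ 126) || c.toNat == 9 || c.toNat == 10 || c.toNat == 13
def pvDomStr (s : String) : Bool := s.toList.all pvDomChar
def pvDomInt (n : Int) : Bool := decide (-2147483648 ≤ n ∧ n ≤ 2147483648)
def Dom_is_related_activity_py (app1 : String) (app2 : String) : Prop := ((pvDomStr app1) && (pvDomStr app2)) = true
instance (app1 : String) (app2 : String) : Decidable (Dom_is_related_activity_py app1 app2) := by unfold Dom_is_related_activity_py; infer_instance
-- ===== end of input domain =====

-- B replaces A's five double scans plus a cross-check by folding a flat keyword→bit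
-- table into one integer bitmask per app and testing a single bitwise AND (alternative).
-- ===== PORT A =====
def is_related_activity_py (app1 : String) (app2 : String) : Bool :=
  let coding_apps : List String := ["vscode", "code", "pycharm", "intellij", "vim", "terminal", "iterm"]
  let browser_apps : List String := ["chrome", "safari", "firefox", "edge"]
  let communication_apps : List String := ["slack", "teams", "zoom", "discord", "wechat", "telegram"]
  let design_apps : List String := ["figma", "sketch", "photoshop", "illustrator"]
  let office_apps : List String := ["word", "excel", "powerpoint", "notion", "obsidian", "pages"]
  let app1_lower := PySem.Str.lower app1
  let app2_lower := PySem.Str.lower app2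
  -- for app_group in [...]: if any(...) and any(...): return True
  if [coding_apps, browser_apps, communication_apps, design_apps, office_apps].any
      (fun app_group =>
        (app_group.any fun app => PySem.Str.isIn app app1_lower) &&
        (app_group.any fun app => PySem.Str.isIn app app2_lower)) then
    true
  else if ((coding_apps.any fun app => PySem.Str.isIn app app1_lower) &&
           (browser_apps.any fun app => PySem.Str.isIn app app2_lower)) ||
          ((coding_apps.any fun app => PySem.Str.isIn app app2_lower) &&
           (browser_apps.any fun app => PySem.Str.isIn app app1_lower)) then
    true
  else
    false

-- ===== PORT B =====
-- _FLAT_KEYWORDS: the flat keyword→bit table of Source B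
def altFlatKeywords : List (String × Nat) :=
  (["vscode", "code", "pycharm", "intellij", "vim", "terminal", "iterm"].map (fun k => (k, 1))) ++
  (["chrome", "safari", "firefox", "edge"].map (fun k => (k, 2))) ++
  (["slack", "teams", "zoom", "discord", "wechat", "telegram"].map (fun k => (k, 4))) ++
  (["figma", "sketch", "photoshop", "illustrator"].map (fun k => (k, 8))) ++
  (["word", "excel", "powerpoint", "notion", "obsidian", "pages"].map (fun k => (k, 16)))

-- _mask: fold the table, or-ing in each matched keyword's bit
def altMask (name : String) : Nat :=
  let n := PySem.Str.lower name
  altFlatKeywords.foldl (fun m p => if PySem.Str.isIn p.1 n then m ||| p.2 else m) 0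

def is_related_activity_py_alt (app1 : String) (app2 : String) : Bool :=
  let m1 := altMask app1
  let m2 := altMask app2
  let m1 := if m1 &&& 1 ≠ 0 then m1 ||| 2 else m1
  let m2 := if m2 &&& 1 ≠ 0 then m2 ||| 2 else m2
  m1 &&& m2 != 0

-- ===== PRECONDITION & SPEC =====
def Spec_is_related_activity_py (app1 : String) (app2 : String) (out : Bool) : Prop := out = is_related_activity_py_alt app1 app2
instance (app1 : String) (app2 : String) (out : Bool) : Decidable (Spec_is_related_activity_py app1 app2 out) := by unfold Spec_is_related_activity_py; infer_instance

-- ===== CLAIM =====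
def Claim_equal_is_related_activity_py : Prop := ∀ (app1 : String) (app2 : String), Dom_is_related_activity_py app1 app2 → Spec_is_related_activity_py app1 app2 (is_related_activity_py app1 app2)

-- ===== LEMMAS AND PROOFS =====
-- Proof plan: both programs depend only on the ten atoms "some keyword of group g
-- occurs in lower(app_i)" (hasKw).  fold_group collapses each same-bit segment of
-- B's fold to one atom, mask_eq gives the closed form of the mask, and key_bool is
-- the resulting 10-variable identity, checked by decide.
def kwCoding : List String := ["vscode", "code", "pycharm", "intellij", "vim", "terminal", "iterm"]
def kwBrowser : List String := ["chrome", "safari", "firefox", "edge"]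
def kwComm : List String := ["slack", "teams", "zoom", "discord", "wechat", "telegram"]
def kwDesign : List String := ["figma", "sketch", "photoshop", "illustrator"]
def kwOffice : List String := ["word", "excel", "powerpoint", "notion", "obsidian", "pages"]

def hasKw (kws : List String) (name : String) : Bool :=
  kws.any fun app => PySem.Str.isIn app (PySem.Str.lower name)

def maskF (x1 x2 x3 x4 x5 : Bool) : Nat :=
  (if x1 then 1 else 0) ||| (if x2 then 2 else 0) ||| (if x3 then 4 else 0) |||
  (if x4 then 8 else 0) ||| (if x5 then 16 else 0)

theorem fold_group (n : String) (b : Nat) (kws : List String) (m : Nat) :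
    (kws.map (fun k => (k, b))).foldl
        (fun m p => if PySem.Str.isIn p.1 n then m ||| p.2 else m) m
      = m ||| (if kws.any (fun k => PySem.Str.isIn k n) then b else 0) := by
  induction kws generalizing m with
  | nil => simp
  | cons k ks ih =>
    cases h : PySem.Str.isIn k n
    · simp only [List.map_cons, List.foldl_cons, List.any_cons, h, Bool.false_or,
        if_neg Bool.false_ne_true, ih]
    · simp only [List.map_cons, List.foldl_cons, List.any_cons, h, Bool.true_or, if_true, ih]
      split_ifs <;> simp [Nat.lor_assoc]

theorem mask_eq (name : String) :
    altMask name =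
      maskF (hasKw kwCoding name) (hasKw kwBrowser name) (hasKw kwComm name)
            (hasKw kwDesign name) (hasKw kwOffice name) := by
  simp only [altMask, altFlatKeywords, List.foldl_append, fold_group, maskF,
    hasKw, kwCoding, kwBrowser, kwComm, kwDesign, kwOffice]
  simp

set_option maxHeartbeats 2000000 in
theorem key_bool (x1 x2 x3 x4 x5 y1 y2 y3 y4 y5 : Bool) :
    (if (x1 && y1) || ((x2 && y2) || ((x3 && y3) || ((x4 && y4) || (x5 && y5)))) then
      true
     else if (x1 && y2) || (y1 && x2) then true else false)
    =
    (let m1 := maskF x1 x2 x3 x4 x5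
     let m2 := maskF y1 y2 y3 y4 y5
     let m1 := if m1 &&& 1 ≠ 0 then m1 ||| 2 else m1
     let m2 := if m2 &&& 1 ≠ 0 then m2 ||| 2 else m2
     m1 &&& m2 != 0) := by
  revert x1 x2 x3 x4 x5 y1 y2 y3 y4 y5
  decide

theorem altB (app1 app2 : String) :
    is_related_activity_py_alt app1 app2 =
    (let m1 := maskF (hasKw kwCoding app1) (hasKw kwBrowser app1) (hasKw kwComm app1) (hasKw kwDesign app1) (hasKw kwOffice app1)
     let m2 := maskF (hasKw kwCoding app2) (hasKw kwBrowser app2) (hasKw kwComm app2) (hasKw kwDesign app2) (hasKw kwOffice app2)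
     let m1 := if m1 &&& 1 ≠ 0 then m1 ||| 2 else m1
     let m2 := if m2 &&& 1 ≠ 0 then m2 ||| 2 else m2
     m1 &&& m2 != 0) := by
  simp only [is_related_activity_py_alt, mask_eq]

theorem aA (app1 app2 : String) :
    is_related_activity_py app1 app2 =
    (if (hasKw kwCoding app1 && hasKw kwCoding app2) || ((hasKw kwBrowser app1 && hasKw kwBrowser app2) || ((hasKw kwComm app1 && hasKw kwComm app2) || ((hasKw kwDesign app1 && hasKw kwDesign app2) || (hasKw kwOffice app1 && hasKw kwOffice app2)))) then true
     else if (hasKw kwCoding app1 && hasKw kwBrowser app2) || (hasKw kwCoding app2 && hasKw kwBrowser app1) then true else false) := by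
  simp only [is_related_activity_py, hasKw, kwCoding, kwBrowser, kwComm, kwDesign, kwOffice,
    List.any_cons, List.any_nil, Bool.or_false]

-- ===== VERDICT =====
theorem is_related_activity_py_spec : Claim_equal_is_related_activity_py := by
  intro app1 app2 _
  unfold Spec_is_related_activity_py
  rw [aA, altB]
  exact key_bool (hasKw kwCoding app1) (hasKw kwBrowser app1) (hasKw kwComm app1)
    (hasKw kwDesign app1) (hasKw kwOffice app1) (hasKw kwCoding app2) (hasKw kwBrowser app2)
    (hasKw kwComm app2) (hasKw kwDesign app2) (hasKw kwOffice app2)
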